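-- pv_equiv track=rewrite | github.com/Vrock691/uni-algo | Semestre2/TD7/chaine.py | Distincts
-- ===== SOURCE A (Python) =====
-- def Distincts(mot):
--     dico={}
--     NouveauMot=""
--     for lettres in mot:
--         if lettres not in dico:
--             dico[lettres]=1
--     for cles in dico:
--         NouveauMot+=cles
--     return NouveauMot
-- ===== SOURCE B (Python) =====
-- def Distincts(mot):
--     # head-and-delete recursion: first char, then recurse on the rest with
--     # every occurrence of that char removed
--     if mot == "":
--         return ""
--     c = mot[0]
--     return c + Distincts(mot[1:].replace(c, ""))
-- ===== Notes on version B (the rewrite author's own statement) =====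
-- stated objective: alternative
-- what changed: B replaces A's dict-then-reread scheme by a head-and-delete recursion: take the first character, delete all of its occurrences from the remainder (str.replace), and recurse; no dict/set of seen characters is kept.
import Mathlib
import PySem

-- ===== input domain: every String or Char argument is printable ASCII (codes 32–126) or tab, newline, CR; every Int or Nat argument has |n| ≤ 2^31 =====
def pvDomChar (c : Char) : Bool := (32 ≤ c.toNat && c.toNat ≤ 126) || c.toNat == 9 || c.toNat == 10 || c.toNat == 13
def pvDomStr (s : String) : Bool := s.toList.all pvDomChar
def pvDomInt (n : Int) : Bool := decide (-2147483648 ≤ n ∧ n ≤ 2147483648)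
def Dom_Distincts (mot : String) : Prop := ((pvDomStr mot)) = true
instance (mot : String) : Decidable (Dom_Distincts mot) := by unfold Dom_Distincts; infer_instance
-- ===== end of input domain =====

-- B replaces A's dict-then-reread scheme by a head-and-delete recursion (take the first
-- character, delete its occurrences from the rest, recurse); same result, different algorithm.

-- ===== PORT A =====
-- first loop: for lettres in mot: if lettres not in dico: dico[lettres] = 1
def Distincts (mot : String) : String :=
  let dico : PySem.Dict Char Int :=
    mot.toList.foldl (fun d lettres =>
      if d.contains lettres = false then d.insert lettres 1 else d) PySem.Dict.empty
  -- second loop: for cles in dico: NouveauMot += cles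
  let nouveauMot : List Char := dico.keys.foldl (fun acc cles => acc ++ [cles]) []
  String.ofList nouveauMot

-- ===== PORT B =====
-- Source B's recursion on the character list; mot[1:].replace(c, "") is, exactly,
-- the tail with every occurrence of c filtered out (single-char replace by "").
def pvDistB : List Char → List Char
  | [] => []
  | c :: t => c :: pvDistB (t.filter (fun x => x != c))
termination_by l => l.length
decreasing_by
  simpa [Nat.lt_succ_iff] using le_trans (List.length_filter_le _ _) (by simp)

def Distincts_alt (mot : String) : String :=
  match mot.toList with
  | [] => ""
  | c :: t => String.ofList (c :: pvDistB (t.filter (fun x => x != c)))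

-- ===== PRECONDITION & SPEC =====
def Spec_Distincts (mot : String) (out : String) : Prop := out = Distincts_alt mot
instance (mot : String) (out : String) : Decidable (Spec_Distincts mot out) := by unfold Spec_Distincts; infer_instance

-- ===== CLAIM (what is proved, stated in full; the proofs are below) =====
def Claim_equal_Distincts : Prop := ∀ (mot : String), Dom_Distincts mot → Spec_Distincts mot (Distincts mot)

-- ===== LEMMAS AND PROOFS =====

lemma pvDistB_nil : pvDistB [] = [] := by rw [pvDistB.eq_def]

lemma pvDistB_cons (c : Char) (t : List Char) :
    pvDistB (c :: t) = c :: pvDistB (t.filter (fun x => x != c)) := by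
  rw [pvDistB.eq_def]

-- reference dedup with an explicit seen-list accumulator
def pvGoA (seen : List Char) : List Char → List Char
  | [] => []
  | c :: t => if c ∈ seen then pvGoA seen t else c :: pvGoA (c :: seen) t

lemma pvGoA_congr (l : List Char) : ∀ (s1 s2 : List Char),
    (∀ x, x ∈ s1 ↔ x ∈ s2) → pvGoA s1 l = pvGoA s2 l := by
  induction l with
  | nil => intro _ _ _; rfl
  | cons c t ih =>
    intro s1 s2 h
    simp only [pvGoA]
    by_cases hc : c ∈ s1
    · rw [if_pos hc, if_pos ((h c).mp hc)]; exact ih s1 s2 h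
    · rw [if_neg hc, if_neg (fun hx => hc ((h c).mpr hx))]
      exact congrArg _ (ih (c :: s1) (c :: s2) (by intro x; simp [h x]))

-- A's first loop: the dict keys accumulate exactly pvGoA over the seen keys
lemma pvA_keys (l : List Char) : ∀ (d : PySem.Dict Char Int),
    (l.foldl (fun d lettres =>
        if d.contains lettres = false then d.insert lettres 1 else d) d).keys
      = d.keys ++ pvGoA d.keys l := by
  induction l with
  | nil => intro d; simp [pvGoA]
  | cons c t ih =>
    intro d
    simp only [List.foldl_cons, pvGoA]
    by_cases hc : d.contains c = true
    · have hmem : c ∈ d.keys := (PySem.Dict.contains_iff_mem_keys d c).mp hc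
      rw [if_neg (by simp [hc]), if_pos hmem, ih d]
    · have hf : d.contains c = false := by simpa using hc
      have hmem : c ∉ d.keys := fun h =>
        hc ((PySem.Dict.contains_iff_mem_keys d c).mpr h)
      rw [if_pos (by simp [hf]), if_neg hmem, ih (d.insert c 1),
        PySem.Dict.keys_insert_of_not_contains d 1 hf,
        pvGoA_congr t (d.keys ++ [c]) (c :: d.keys) (by intro x; simp; tauto)]
      simp

-- B's recursion computes pvGoA, through filtering out the already-seen characters
lemma pvB_eq_goA (l : List Char) : ∀ (seen : List Char),
    pvGoA seen l = pvDistB (l.filter (fun x => !(seen.contains x))) := by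
  induction l with
  | nil => intro _; simp [pvGoA, pvDistB_nil]
  | cons c t ih =>
    intro seen
    simp only [pvGoA, List.filter_cons]
    by_cases hc : c ∈ seen
    · rw [if_pos hc, if_neg (by simp [hc]), ih seen]
    · rw [if_neg hc, if_pos (by simp [hc]), pvDistB_cons]
      rw [List.filter_filter, ih (c :: seen)]
      have hfe : List.filter (fun x => !(c :: seen).contains x) t
          = List.filter (fun a => a != c && !seen.contains a) t := by
        apply List.filter_congr
        intro x _
        simp [List.contains_eq_mem, bne, eq_comm, Bool.beq_eq_decide_eq]
      rw [hfe]

-- ===== VERDICT (by name: the statement is the Claim_ definition above) =====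
theorem Distincts_spec : Claim_equal_Distincts := by
  intro mot _
  unfold Spec_Distincts Distincts Distincts_alt
  dsimp only
  rw [PySem.List.foldl_append_singleton, List.nil_append, pvA_keys mot.toList PySem.Dict.empty]
  cases h : mot.toList with
  | nil => simp [pvGoA]
  | cons c t =>
    simp only [PySem.Dict.keys_empty, List.nil_append, pvGoA, List.not_mem_nil, if_false]
    rw [pvB_eq_goA t [c]]
    have hfe : List.filter (fun x => !(List.contains [c] x)) t
        = List.filter (fun x => x != c) t := by
      apply List.filter_congr
      intro x _
      simp [List.contains_eq_mem, bne, Bool.beq_eq_decide_eq]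
    rw [hfe]
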